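-- pv_equiv track=rewrite | github.com/panther-labs/asana-ticket-router | airplane/v2/tasks/scheduled_deploys/shared.py | parse_deployment_schedule
-- ===== SOURCE A (Python) =====
-- DEPLOYMENT_VERSION_COMMENT_PLACEHOLDER = "Version:"
--
-- DEPLOYMENT_TIME_COMMENT_PLACEHOLDER = "Deployment Time:"
--
-- def get_deployment_time(comment: str) -> str or None:
--     if comment.startswith(DEPLOYMENT_TIME_COMMENT_PLACEHOLDER):
--         return comment.removeprefix(DEPLOYMENT_TIME_COMMENT_PLACEHOLDER).strip()
--
-- def get_deployment_version(comment: str) -> str or None: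
--     if comment.startswith(DEPLOYMENT_VERSION_COMMENT_PLACEHOLDER):
--         return comment.removeprefix(DEPLOYMENT_VERSION_COMMENT_PLACEHOLDER).strip()
--
-- def parse_deployment_schedule(comments: list[str]) -> tuple[str, str]:
--     deployment_time = ""
--     deployment_version = ""
--     for comment in comments:
--         if not deployment_time:
--             deployment_time = get_deployment_time(comment)
--         if not deployment_version:
--             deployment_version = get_deployment_version(comment)
--     if not deployment_time:
--         raise ValueError(f"Unable to get the deployment time from following comments: {comments}")
--     if not deployment_version:
--         raise ValueError(f"Unable to get the deployment version from following comments: {comments}")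
--     return deployment_time, deployment_version
-- ===== SOURCE B (Python) =====
-- DEPLOYMENT_VERSION_COMMENT_PLACEHOLDER = "Version:"
--
-- DEPLOYMENT_TIME_COMMENT_PLACEHOLDER = "Deployment Time:"
--
--
-- def get_deployment_time(comment: str) -> str or None:
--     if comment.startswith(DEPLOYMENT_TIME_COMMENT_PLACEHOLDER):
--         return comment.removeprefix(DEPLOYMENT_TIME_COMMENT_PLACEHOLDER).strip()
--
--
-- def get_deployment_version(comment: str) -> str or None:
--     if comment.startswith(DEPLOYMENT_VERSION_COMMENT_PLACEHOLDER):
--         return comment.removeprefix(DEPLOYMENT_VERSION_COMMENT_PLACEHOLDER).strip()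
--
--
-- def parse_deployment_schedule(comments: list[str]) -> tuple[str, str]:
--     deployment_time = next((t for c in comments if (t := get_deployment_time(c))), "")
--     deployment_version = next((v for c in comments if (v := get_deployment_version(c))), "")
--     if not deployment_time:
--         raise ValueError(f"Unable to get the deployment time from following comments: {comments}")
--     if not deployment_version:
--         raise ValueError(f"Unable to get the deployment version from following comments: {comments}")
--     return deployment_time, deployment_version
-- ===== Notes on version B (the rewrite author's own statement) =====
-- stated objective: simpler
-- what changed: Replaces the single interleaved loop over a two-variable mutable state with two independent first-truthy-match generator searches (one per field).
import Mathlib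
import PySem

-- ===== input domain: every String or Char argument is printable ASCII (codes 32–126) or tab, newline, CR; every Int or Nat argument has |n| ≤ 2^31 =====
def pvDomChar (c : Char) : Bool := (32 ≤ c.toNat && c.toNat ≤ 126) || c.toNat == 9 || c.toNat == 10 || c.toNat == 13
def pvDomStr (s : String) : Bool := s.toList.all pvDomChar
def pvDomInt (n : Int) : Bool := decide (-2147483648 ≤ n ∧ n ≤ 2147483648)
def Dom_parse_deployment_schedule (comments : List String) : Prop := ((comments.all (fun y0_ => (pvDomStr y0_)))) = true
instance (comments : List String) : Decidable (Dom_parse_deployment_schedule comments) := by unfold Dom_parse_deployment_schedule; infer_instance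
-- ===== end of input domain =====

-- B resolves the deployment time and version by two independent first-match searches instead of A's
-- single interleaved loop over a two-variable mutable state; equivalence is about the return value.


-- ===== PORT A =====
-- comment.removeprefix(p) under a startswith guard is exactly dropping p.length characters
def get_deployment_time (comment : String) : Option String :=
  if PySem.Str.startswith comment "Deployment Time:" then
    some (PySem.Str.strip (String.mk (comment.toList.drop 16)))
  else none

def get_deployment_version (comment : String) : Option String :=
  if PySem.Str.startswith comment "Version:" then
    some (PySem.Str.strip (String.mk (comment.toList.drop 8)))
  else none

-- Python truthiness of the loop variables (None and "" are falsy)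
def pvTruthy (o : Option String) : Bool :=
  match o with
  | some s => s ≠ ""
  | none => false

-- A's for-loop over the pair of mutable variables
def pvLoopA : List String → Option String → Option String → Option String × Option String
  | [], t, v => (t, v)
  | c :: rest, t, v =>
      pvLoopA rest (if pvTruthy t then t else get_deployment_time c)
                   (if pvTruthy v then v else get_deployment_version c)

def parse_deployment_schedule (comments : List String) : String × String :=
  let r := pvLoopA comments (some "") (some "")
  if pvTruthy r.1 then
    if pvTruthy r.2 then (r.1.getD "", r.2.getD "")
    else ("", "")  -- Python raises ValueError here; excluded by Pre_
  else ("", "")    -- Python raises ValueError here; excluded by Pre_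

-- ===== PORT B =====
-- next((t for c in comments if (t := f(c))), ""): first truthy extracted value, else ""
def pvFindFirst (f : String → Option String) : List String → String
  | [] => ""
  | c :: rest =>
      match f c with
      | some s => if s ≠ "" then s else pvFindFirst f rest
      | none => pvFindFirst f rest

def parse_deployment_schedule_alt (comments : List String) : String × String :=
  let deployment_time := pvFindFirst get_deployment_time comments
  let deployment_version := pvFindFirst get_deployment_version comments
  if deployment_time = "" then ("", "")      -- Python raises ValueError here; excluded by Pre_
  else if deployment_version = "" then ("", "")
  else (deployment_time, deployment_version)

-- ===== PRECONDITION & SPEC =====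
-- Pre_ excludes exactly the inputs where A raises ValueError: lists with no comment providing a
-- non-empty stripped remainder after "Deployment Time:" and one after "Version:".
def Pre_parse_deployment_schedule (comments : List String) : Prop :=
  (∃ c ∈ comments, PySem.Str.startswith c "Deployment Time:" = true ∧
      PySem.Str.strip (String.mk (c.toList.drop 16)) ≠ "") ∧
  (∃ c ∈ comments, PySem.Str.startswith c "Version:" = true ∧
      PySem.Str.strip (String.mk (c.toList.drop 8)) ≠ "")

instance (comments : List String) : Decidable (Pre_parse_deployment_schedule comments) := by
  unfold Pre_parse_deployment_schedule; infer_instance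

def pvWitness_parse_deployment_schedule : List String :=
  ["Deployment Time: 5pm", "Version: 1.2"]

def Spec_parse_deployment_schedule (comments : List String) (out : String × String) : Prop := out = parse_deployment_schedule_alt comments
instance (comments : List String) (out : String × String) : Decidable (Spec_parse_deployment_schedule comments out) := by unfold Spec_parse_deployment_schedule; infer_instance

-- ===== CLAIM (what is proved, stated in full; the proofs are below) =====
def Claim_equal_parse_deployment_schedule : Prop := ∀ (comments : List String), Dom_parse_deployment_schedule comments → Pre_parse_deployment_schedule comments → Spec_parse_deployment_schedule comments (parse_deployment_schedule comments)

-- ===== LEMMAS AND PROOFS =====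

-- one component of A's loop
def pvLoop1 (f : String → Option String) : List String → Option String → Option String
  | [], t => t
  | c :: rest, t => pvLoop1 f rest (if pvTruthy t then t else f c)

theorem pvLoopA_eq (cs : List String) : ∀ t v,
    pvLoopA cs t v = (pvLoop1 get_deployment_time cs t, pvLoop1 get_deployment_version cs v) := by
  induction cs with
  | nil => intro t v; rfl
  | cons c rest ih => intro t v; simp [pvLoopA, pvLoop1, ih]

theorem pvLoop1_stay (f : String → Option String) (cs : List String) :
    ∀ t, pvTruthy t = true → pvLoop1 f cs t = t := by
  induction cs with
  | nil => intro t _; rfl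
  | cons c rest ih => intro t ht; simp [pvLoop1, ht, ih t ht]

theorem pvLoop1_find (f : String → Option String) (cs : List String) :
    ∀ t, pvTruthy t = false → (∃ c ∈ cs, pvTruthy (f c) = true) →
      pvLoop1 f cs t = some (pvFindFirst f cs) ∧ pvFindFirst f cs ≠ "" := by
  induction cs with
  | nil => intro t _ h; simp at h
  | cons c rest ih =>
    intro t ht hex
    by_cases hc : pvTruthy (f c) = true
    · obtain ⟨s, hs⟩ : ∃ s, f c = some s := by
        cases h : f c with
        | none => rw [h] at hc; simp [pvTruthy] at hc
        | some s => exact ⟨s, rfl⟩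
      have hsne : s ≠ "" := by rw [hs] at hc; simpa [pvTruthy] using hc
      have hstay := pvLoop1_stay f rest (some s) (by rw [hs] at hc; exact hc)
      constructor
      · simp [pvLoop1, ht, pvFindFirst, hs, hsne, hstay]
      · simp [pvFindFirst, hs, hsne]
    · have hex' : ∃ c ∈ rest, pvTruthy (f c) = true := by
        rcases hex with ⟨x, hx, hxt⟩
        rcases List.mem_cons.mp hx with rfl | hx'
        · exact absurd hxt hc
        · exact ⟨x, hx', hxt⟩
      have hc' : pvTruthy (f c) = false := by simpa using hc
      have := ih (f c) hc' hex'
      have hff : pvFindFirst f (c :: rest) = pvFindFirst f rest := by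
        cases h : f c with
        | none => simp [pvFindFirst, h]
        | some s =>
          have : s = "" := by
            rw [h] at hc'; simpa [pvTruthy] using hc'
          simp [pvFindFirst, h, this]
      rw [hff]
      exact ⟨by simp [pvLoop1, ht, this.1], this.2⟩

theorem pvTruthy_time (c : String) :
    pvTruthy (get_deployment_time c) = true ↔
      (PySem.Str.startswith c "Deployment Time:" = true ∧
        PySem.Str.strip (String.mk (c.toList.drop 16)) ≠ "") := by
  unfold get_deployment_time
  cases h : PySem.Str.startswith c "Deployment Time:" <;> simp [pvTruthy]

theorem pvTruthy_version (c : String) :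
    pvTruthy (get_deployment_version c) = true ↔
      (PySem.Str.startswith c "Version:" = true ∧
        PySem.Str.strip (String.mk (c.toList.drop 8)) ≠ "") := by
  unfold get_deployment_version
  cases h : PySem.Str.startswith c "Version:" <;> simp [pvTruthy]

-- ===== VERDICT (by name: the statement is the Claim_ definition above) =====
theorem parse_deployment_schedule_spec : Claim_equal_parse_deployment_schedule := by
  intro comments _ hpre
  obtain ⟨hT, hV⟩ := hpre
  have hT' : ∃ c ∈ comments, pvTruthy (get_deployment_time c) = true := by
    rcases hT with ⟨c, hc, h⟩; exact ⟨c, hc, (pvTruthy_time c).mpr h⟩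
  have hV' : ∃ c ∈ comments, pvTruthy (get_deployment_version c) = true := by
    rcases hV with ⟨c, hc, h⟩; exact ⟨c, hc, (pvTruthy_version c).mpr h⟩
  have h0 : pvTruthy (some "") = false := by simp [pvTruthy]
  obtain ⟨ht, htne⟩ := pvLoop1_find get_deployment_time comments (some "") h0 hT'
  obtain ⟨hv, hvne⟩ := pvLoop1_find get_deployment_version comments (some "") h0 hV'
  unfold Spec_parse_deployment_schedule parse_deployment_schedule parse_deployment_schedule_alt
  simp [pvLoopA_eq, ht, hv, pvTruthy, htne, hvne]
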